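-- pv_equiv track=rewrite | github.com/davebelais/setuptools-setup-versions | setuptools_setup_versions/parse.py | _get_imbalance_index
-- ===== SOURCE A (Python) =====
-- def _get_imbalance_index(
--     text: str, imbalance: int = 0, boundary_characters: str = "()"
-- ) -> int:
--     """
--     This function accepts text
--
--     Parameters:
--
--     - **text** (str)
--     - **imbalance** (int) = 0
--     - **boundary_characters** (str) = "()"
--
--     Returns an integer where:
--
--     - If the parenthesis are not balanced--the integer is the imbalance
--       index at the end of the text (a negative number).
--
--     - If the parenthesis are balanced--the integer is the index at which
--       they become so (a positive integer).
--     """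
--     index = 0
--     length = len(text)
--     while index < length and imbalance != 0:
--         character = text[index]
--         if character == boundary_characters[0]:
--             imbalance -= 1
--         elif character == boundary_characters[-1]:
--             imbalance += 1
--         index += 1
--     return index if imbalance == 0 else imbalance
-- ===== SOURCE B (Python) =====
-- def _get_imbalance_index(
--     text: str, imbalance: int = 0, boundary_characters: str = "()"
-- ) -> int:
--     # Prefix-sum table: entry 0 is the starting imbalance, then one running
--     # total per character; first zero entry's index wins, else the final total.
--     open_s = boundary_characters[:1]
--     close_s = boundary_characters[-1:]
--     prefix = [imbalance]
--     for c in text: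
--         d = -1 if c == open_s else (1 if c == close_s else 0)
--         prefix.append(prefix[-1] + d)
--     for i, v in enumerate(prefix):
--         if v == 0:
--             return i
--     return prefix[-1]
-- ===== Notes on version B (the rewrite author's own statement) =====
-- stated objective: alternative
-- what changed: Replaces A's single early-exit while-loop over index/imbalance state with building a prefix-sum table of per-character deltas and then scanning it for the first zero entry (else its final entry).
import Mathlib
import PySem

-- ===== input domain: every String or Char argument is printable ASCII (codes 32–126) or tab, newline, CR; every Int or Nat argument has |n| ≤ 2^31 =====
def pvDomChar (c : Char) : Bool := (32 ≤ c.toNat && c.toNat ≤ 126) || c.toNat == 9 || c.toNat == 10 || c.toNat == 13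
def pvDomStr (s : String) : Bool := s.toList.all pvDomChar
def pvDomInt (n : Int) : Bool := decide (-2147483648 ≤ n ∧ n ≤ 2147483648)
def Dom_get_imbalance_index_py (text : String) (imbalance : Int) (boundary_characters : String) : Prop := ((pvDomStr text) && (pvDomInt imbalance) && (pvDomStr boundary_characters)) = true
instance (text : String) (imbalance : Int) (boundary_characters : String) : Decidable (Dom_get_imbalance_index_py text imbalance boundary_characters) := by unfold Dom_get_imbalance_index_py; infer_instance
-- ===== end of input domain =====

-- B replaces A's while-loop with a prefix-sum table scanned for its first zero (same cost, different decomposition).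

-- ===== PORT A =====
-- the while loop: recursion over the remaining characters, carrying index and imbalance
def pvALoop (o cl : Option Char) : List Char → Int → Int → Int
  | [], index, imb => if imb = 0 then index else imb
  | c :: rest, index, imb =>
    if imb = 0 then index
    else pvALoop o cl rest (index + 1)
      (if some c = o then imb - 1 else if some c = cl then imb + 1 else imb)

def get_imbalance_index_py (text : String) (imbalance : Int) (boundary_characters : String) : Int :=
  pvALoop (PySem.Str.pyGet? boundary_characters 0) (PySem.Str.pyGet? boundary_characters (-1))
    text.toList 0 imbalance

-- ===== PORT B =====
-- prefix.append(prefix[-1] + d) loop, carrying the running total; os/cs are the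
-- one-character slices boundary_characters[:1] and boundary_characters[-1:] (as char lists)
def pvBPrefix (os cs : List Char) : List Char → Int → List Int
  | [], acc => [acc]
  | c :: rest, acc =>
    acc :: pvBPrefix os cs rest
      (acc + (if [c] = os then -1 else if [c] = cs then 1 else 0))

-- the enumerate scan for the first zero entry
def pvBFindZero : List Int → Int → Option Int
  | [], _ => none
  | v :: rest, i => if v = 0 then some i else pvBFindZero rest (i + 1)

-- prefix[-1]
def pvBLast : List Int → Int → Int
  | [], d => d
  | [v], _ => v
  | _ :: v :: rest, d => pvBLast (v :: rest) d

def get_imbalance_index_py_alt (text : String) (imbalance : Int) (boundary_characters : String) : Int :=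
  let os := PySem.List.slice boundary_characters.toList none (some 1)
  let cs := PySem.List.slice boundary_characters.toList (some (-1)) none
  let pfx := pvBPrefix os cs text.toList imbalance
  match pvBFindZero pfx 0 with
  | some i => i
  | none => pvBLast pfx imbalance

-- ===== PRECONDITION & SPEC =====
-- Pre_ excludes exactly the inputs on which Python A raises IndexError
-- (empty boundary_characters with nonempty text and nonzero imbalance).
def Pre_get_imbalance_index_py (text : String) (imbalance : Int) (boundary_characters : String) : Prop :=
  boundary_characters ≠ "" ∨ text = "" ∨ imbalance = 0
instance (text : String) (imbalance : Int) (boundary_characters : String) : Decidable (Pre_get_imbalance_index_py text imbalance boundary_characters) := by unfold Pre_get_imbalance_index_py; infer_instance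

def pvWitness_get_imbalance_index_py : String × Int × String := ("(a)", 1, "()")

def Spec_get_imbalance_index_py (text : String) (imbalance : Int) (boundary_characters : String) (out : Int) : Prop := out = get_imbalance_index_py_alt text imbalance boundary_characters
instance (text : String) (imbalance : Int) (boundary_characters : String) (out : Int) : Decidable (Spec_get_imbalance_index_py text imbalance boundary_characters out) := by unfold Spec_get_imbalance_index_py; infer_instance

-- ===== CLAIM (what is proved, stated in full; the proofs are below) =====
def Claim_equal_get_imbalance_index_py : Prop := ∀ (text : String) (imbalance : Int) (boundary_characters : String), Dom_get_imbalance_index_py text imbalance boundary_characters → Pre_get_imbalance_index_py text imbalance boundary_characters → Spec_get_imbalance_index_py text imbalance boundary_characters (get_imbalance_index_py text imbalance boundary_characters)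


-- ===== LEMMAS AND PROOFS =====

theorem pvBPrefix_ne_nil (os cs : List Char) (l : List Char) (acc : Int) :
    pvBPrefix os cs l acc ≠ [] := by
  cases l <;> simp [pvBPrefix]

theorem pvBLast_cons_of_ne (a : Int) (l : List Int) (d : Int) (h : l ≠ []) :
    pvBLast (a :: l) d = pvBLast l d := by
  cases l with
  | nil => exact absurd rfl h
  | cons b t => rfl

-- B's open test ([c] = bc[:1]) agrees with A's (c == bc[0])
theorem pv_open_iff (c : Char) (bc : List Char) :
    ((some c = PySem.List.pyGet? bc 0) ↔ ([c] = PySem.List.slice bc none (some 1))) := by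
  rw [PySem.List.slice_to bc (by omega)]
  cases bc with
  | nil => simp [PySem.List.pyGet?_zero]
  | cons a t => simp

-- B's close test ([c] = bc[-1:]) agrees with A's (c == bc[-1])
theorem pv_close_iff (c : Char) (bc : List Char) :
    ((some c = PySem.List.pyGet? bc (-1)) ↔ ([c] = PySem.List.slice bc (some (-1)) none)) := by
  rw [PySem.List.pyGet?_neg_one, PySem.List.slice_from_neg_one]
  cases bc with
  | nil => simp
  | cons a t =>
    rw [List.getLast?_eq_getElem?]
    have hlen : (a :: t).length - 1 < (a :: t).length := by simp
    rw [List.getElem?_eq_getElem hlen]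
    have hdrop : (a :: t).drop ((a :: t).length - 1) = [(a :: t)[(a :: t).length - 1]] := by
      rw [List.drop_eq_getElem_cons hlen]
      simp
    rw [hdrop]
    simp

-- the core invariant: A's loop equals B's first-zero-else-last scan of the prefix table,
-- given that the open/close tests agree
theorem pv_core (o cl : Option Char) (os cs : List Char)
    (ho : ∀ c : Char, (some c = o) ↔ ([c] = os))
    (hc : ∀ c : Char, (some c = cl) ↔ ([c] = cs)) (l : List Char) :
    ∀ (i imb d : Int),
      pvALoop o cl l i imb =
        (match pvBFindZero (pvBPrefix os cs l imb) i with
         | some j => j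
         | none => pvBLast (pvBPrefix os cs l imb) d) := by
  induction l with
  | nil =>
    intro i imb d
    by_cases h : imb = 0 <;> simp [pvALoop, pvBPrefix, pvBFindZero, pvBLast, h]
  | cons c rest ih =>
    intro i imb d
    by_cases h : imb = 0
    · simp [pvALoop, pvBPrefix, pvBFindZero, h]
    · have hd : pvBFindZero (pvBPrefix os cs (c :: rest) imb) i
          = pvBFindZero (pvBPrefix os cs rest
              (imb + (if [c] = os then -1 else if [c] = cs then 1 else 0))) (i + 1) := by
        simp [pvBPrefix, pvBFindZero, h]
      have hl : pvBLast (pvBPrefix os cs (c :: rest) imb) d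
          = pvBLast (pvBPrefix os cs rest
              (imb + (if [c] = os then -1 else if [c] = cs then 1 else 0))) d := by
        simp only [pvBPrefix]
        exact pvBLast_cons_of_ne _ _ _ (pvBPrefix_ne_nil _ _ _ _)
      have harith : (if some c = o then imb - 1 else if some c = cl then imb + 1 else imb)
          = imb + (if [c] = os then -1 else if [c] = cs then 1 else 0) := by
        by_cases h1 : [c] = os
        · rw [if_pos ((ho c).mpr h1), if_pos h1]; ring
        · rw [if_neg (fun hh => h1 ((ho c).mp hh)), if_neg h1]
          by_cases h2 : [c] = cs
          · rw [if_pos ((hc c).mpr h2), if_pos h2]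
          · rw [if_neg (fun hh => h2 ((hc c).mp hh)), if_neg h2]; ring
      rw [hd, hl]
      simp only [pvALoop, if_neg h, harith]
      exact ih (i + 1) (imb + (if [c] = os then -1 else if [c] = cs then 1 else 0)) d

-- ===== VERDICT (by name: the statement is the Claim_ definition above) =====
theorem get_imbalance_index_py_spec : Claim_equal_get_imbalance_index_py := by
  intro text imbalance bc _ _
  unfold Spec_get_imbalance_index_py get_imbalance_index_py get_imbalance_index_py_alt
  exact pv_core _ _ _ _
    (fun c => by simpa using pv_open_iff c bc.toList)
    (fun c => by simpa using pv_close_iff c bc.toList)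
    text.toList 0 imbalance imbalance
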